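-- pv_equiv track=rewrite | github.com/karl-bjorkman/medical-insurance-project | med-insurance-project.py | loc_counter
-- ===== SOURCE A (Python) =====
-- def loc_counter(region_lst):
--     loc_lst = []
--     sw_count = 0
--     se_count = 0
--     nw_count = 0
--     ne_count = 0
--     # Not returned, but finds all location names from csv file
--     for region in region_lst:
--         if region not in loc_lst:
--             loc_lst.append(region)
--     for region in region_lst:
--         if region == 'southwest':
--             sw_count += 1
--         elif region == 'southeast':
--             se_count += 1
--         elif region == 'northwest':
--             nw_count += 1
--         elif region == 'northeast':
--             ne_count += 1
--         else:
--             return None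
--
--     return "Southwest: {sw}, Southeast: {se}, Northwest: {nw}, Northeast: {ne}".format(
--         sw=sw_count, se=se_count, nw=nw_count, ne=ne_count)
-- ===== SOURCE B (Python) =====
-- def loc_counter(region_lst):
--     valid = ('southwest', 'southeast', 'northwest', 'northeast')
--     if any(r not in valid for r in region_lst):
--         return None
--     return "Southwest: {}, Southeast: {}, Northwest: {}, Northeast: {}".format(
--         region_lst.count('southwest'), region_lst.count('southeast'),
--         region_lst.count('northwest'), region_lst.count('northeast'))
-- ===== Notes on version B (the rewrite author's own statement) =====
-- stated objective: faster
-- what changed: Replaced the interleaved counting-with-early-return loop plus A's quadratic unused dedup pass by a validate-then-tally decomposition: one any() validity check, then list.count per region name.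
import Mathlib
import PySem

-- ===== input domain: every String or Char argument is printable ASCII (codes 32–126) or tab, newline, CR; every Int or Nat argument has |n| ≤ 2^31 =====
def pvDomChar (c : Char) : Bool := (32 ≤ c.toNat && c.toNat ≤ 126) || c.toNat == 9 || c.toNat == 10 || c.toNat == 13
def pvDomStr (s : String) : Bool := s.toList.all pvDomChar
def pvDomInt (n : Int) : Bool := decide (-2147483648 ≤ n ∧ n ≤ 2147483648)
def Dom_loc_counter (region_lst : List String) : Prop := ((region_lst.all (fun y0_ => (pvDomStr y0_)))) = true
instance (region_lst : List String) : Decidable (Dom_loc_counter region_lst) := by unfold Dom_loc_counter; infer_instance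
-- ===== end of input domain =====

-- B replaces A's interleaved count-and-early-return loop by validate-then-tally (simpler decomposition).

-- ===== PORT A =====
def locCounterLoop : List String → Int → Int → Int → Int → Option String
  | [], sw, se, nw, ne =>
    some ("Southwest: " ++ PySem.Int.toStr sw ++ ", Southeast: " ++ PySem.Int.toStr se ++
          ", Northwest: " ++ PySem.Int.toStr nw ++ ", Northeast: " ++ PySem.Int.toStr ne)
  | region :: rest, sw, se, nw, ne =>
    if region == "southwest" then locCounterLoop rest (sw + 1) se nw ne
    else if region == "southeast" then locCounterLoop rest sw (se + 1) nw ne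
    else if region == "northwest" then locCounterLoop rest sw se (nw + 1) ne
    else if region == "northeast" then locCounterLoop rest sw se nw (ne + 1)
    else none

def loc_counter (region_lst : List String) : Option String :=
  -- A builds loc_lst but never uses it; ported faithfully as a discarded value
  let _loc_lst := region_lst.foldl (fun acc region => if region ∈ acc then acc else acc ++ [region]) []
  locCounterLoop region_lst 0 0 0 0

-- ===== PORT B =====
def loc_counter_alt (region_lst : List String) : Option String :=
  let valid := ["southwest", "southeast", "northwest", "northeast"]
  if region_lst.any (fun r => !(valid.contains r)) then none
  else
    some ("Southwest: " ++ PySem.Int.toStr (PySem.List.count region_lst "southwest") ++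
          ", Southeast: " ++ PySem.Int.toStr (PySem.List.count region_lst "southeast") ++
          ", Northwest: " ++ PySem.Int.toStr (PySem.List.count region_lst "northwest") ++
          ", Northeast: " ++ PySem.Int.toStr (PySem.List.count region_lst "northeast"))

-- ===== PRECONDITION & SPEC =====
def Spec_loc_counter (region_lst : List String) (out : Option String) : Prop := out = loc_counter_alt region_lst
instance (region_lst : List String) (out : Option String) : Decidable (Spec_loc_counter region_lst out) := by unfold Spec_loc_counter; infer_instance

-- ===== CLAIM (what is proved, stated in full; the proofs are below) =====
def Claim_equal_loc_counter : Prop := ∀ (region_lst : List String), Dom_loc_counter region_lst → Spec_loc_counter region_lst (loc_counter region_lst)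

-- ===== LEMMAS AND PROOFS =====
lemma locCounterLoop_eq (l : List String) : ∀ (sw se nw ne : Int),
    locCounterLoop l sw se nw ne =
      if l.any (fun r => !(["southwest", "southeast", "northwest", "northeast"].contains r)) then none
      else some ("Southwest: " ++ PySem.Int.toStr (sw + PySem.List.count l "southwest") ++
            ", Southeast: " ++ PySem.Int.toStr (se + PySem.List.count l "southeast") ++
            ", Northwest: " ++ PySem.Int.toStr (nw + PySem.List.count l "northwest") ++
            ", Northeast: " ++ PySem.Int.toStr (ne + PySem.List.count l "northeast")) := by
  induction l with
  | nil => intro sw se nw ne; simp [locCounterLoop, PySem.List.count]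
  | cons r rest ih =>
    intro sw se nw ne
    by_cases h1 : r = "southwest"
    · subst h1
      simp [locCounterLoop, ih, PySem.List.count_eq]
      ring_nf
    · by_cases h2 : r = "southeast"
      · subst h2
        simp [locCounterLoop, ih, PySem.List.count_eq]
        ring_nf
      · by_cases h3 : r = "northwest"
        · subst h3
          simp [locCounterLoop, ih, PySem.List.count_eq]
          ring_nf
        · by_cases h4 : r = "northeast"
          · subst h4
            simp [locCounterLoop, ih, PySem.List.count_eq]
            ring_nf
          · simp [locCounterLoop, h1, h2, h3, h4]

-- ===== VERDICT (by name: the statement is the Claim_ definition above) =====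
theorem loc_counter_spec : Claim_equal_loc_counter := by
  intro l _
  show loc_counter l = loc_counter_alt l
  simp only [loc_counter, loc_counter_alt, locCounterLoop_eq, Int.zero_add]
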